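-- pv_equiv track=rewrite | github.com/patthmus/voicesinterleave | pages/3_🎶Fugatos by performer.py | ticks_positions
-- ===== SOURCE A (Python) =====
-- def ticks_positions(n: int)->list[int]:
--     """Compute ticks position for group of 6 box plots
--
--     Args:
--         n: total number of box plots
--
--     Returns:
--         positions of the grouped ticks labels in the graph
--     """
--     res = []
--     i, c= 1, 0
--     while c < n:
--         res.append(i)
--         c += 1
--         if c % 6 == 0: i += 2
--         else: i += 1
--     return res
-- ===== SOURCE B (Python) =====
-- def ticks_positions(n: int) -> list[int]:
--     """Closed-form: position of the k-th box plot is 1 + k + k//6."""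
--     return [1 + k + k // 6 for k in range(n)]
-- ===== Notes on version B (the rewrite author's own statement) =====
-- stated objective: simpler
-- what changed: Replaces the while-loop that accumulates a running position and counter with a direct closed-form formula 1 + k + k//6 per index.
import Mathlib
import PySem

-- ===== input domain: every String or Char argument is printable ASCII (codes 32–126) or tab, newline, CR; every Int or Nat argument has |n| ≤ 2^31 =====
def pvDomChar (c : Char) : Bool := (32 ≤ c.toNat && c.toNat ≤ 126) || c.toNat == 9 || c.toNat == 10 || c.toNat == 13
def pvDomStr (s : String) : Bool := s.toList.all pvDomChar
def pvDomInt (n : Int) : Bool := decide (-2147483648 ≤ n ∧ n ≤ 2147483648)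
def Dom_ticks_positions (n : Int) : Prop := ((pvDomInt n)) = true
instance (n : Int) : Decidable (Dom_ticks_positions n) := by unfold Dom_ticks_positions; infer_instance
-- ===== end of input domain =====

-- B replaces A's while-loop accumulator with the closed-form position 1 + k + k//6 per index (simpler).


-- ===== PORT A =====
-- while c < n: append i; c += 1; if c % 6 == 0 then i += 2 else i += 1
def ticksLoop (n i c : Int) (res : List Int) : List Int :=
  if c < n then
    ticksLoop n (if PySem.Int.mod (c + 1) 6 = 0 then i + 2 else i + 1) (c + 1) (res ++ [i])
  else res
termination_by (n - c).toNat
decreasing_by omega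

def ticks_positions (n : Int) : List Int := ticksLoop n 1 0 []

-- ===== PORT B =====
def ticks_positions_alt (n : Int) : List Int :=
  (PySem.List.pyRange 0 n 1).map (fun k => 1 + k + PySem.Int.floordiv k 6)

-- ===== PRECONDITION & SPEC =====
def Spec_ticks_positions (n : Int) (out : List Int) : Prop := out = ticks_positions_alt n
instance (n : Int) (out : List Int) : Decidable (Spec_ticks_positions n out) := by unfold Spec_ticks_positions; infer_instance

-- ===== CLAIM (what is proved, stated in full; the proofs are below) =====
def Claim_equal_ticks_positions : Prop := ∀ (n : Int), Dom_ticks_positions n → Spec_ticks_positions n (ticks_positions n)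

-- ===== LEMMAS AND PROOFS =====

-- Loop invariant: with c ≥ 0 and i the closed-form position 1 + c + c//6, the loop
-- appends the closed-form positions of all remaining indices c, c+1, …, n-1.
theorem ticksLoop_eq (n c : Int) (hc : 0 ≤ c) (res : List Int) :
    ticksLoop n (1 + c + PySem.Int.floordiv c 6) c res
      = res ++ (PySem.List.pyRange c n 1).map (fun k => 1 + k + PySem.Int.floordiv k 6) := by
  by_cases h : c < n
  · rw [ticksLoop, if_pos h, PySem.List.pyRange_one_cons h]
    have hstep :
        (if PySem.Int.mod (c + 1) 6 = 0 then (1 + c + PySem.Int.floordiv c 6) + 2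
         else (1 + c + PySem.Int.floordiv c 6) + 1)
          = 1 + (c + 1) + PySem.Int.floordiv (c + 1) 6 := by
      rw [PySem.Int.mod_eq_emod_of_pos (by norm_num),
          PySem.Int.floordiv_eq_ediv_of_pos (by norm_num),
          PySem.Int.floordiv_eq_ediv_of_pos (by norm_num)]
      split_ifs with h6 <;> omega
    rw [hstep, ticksLoop_eq n (c + 1) (by omega)]
    simp
  · rw [ticksLoop, if_neg h]
    have : PySem.List.pyRange c n 1 = [] := by
      simp [PySem.List.pyRange]; omega
    simp [this]
termination_by (n - c).toNat
decreasing_by omega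

-- ===== VERDICT (by name: the statement is the Claim_ definition above) =====
theorem ticks_positions_spec : Claim_equal_ticks_positions := by
  intro n _
  show ticks_positions n = ticks_positions_alt n
  have := ticksLoop_eq n 0 le_rfl []
  simpa [ticks_positions, ticks_positions_alt, PySem.Int.floordiv] using this
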